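-- pv_equiv track=rewrite | github.com/minercanseco/panel_pedidos | panel/controlador_panel_pedidos.py | _validar_si_los_pedidos_son_del_mismo_cliente
-- ===== SOURCE A (Python) =====
-- def _validar_si_los_pedidos_son_del_mismo_cliente(filas):
--     business_entity_ids = []
--     for fila in filas:
--         business_entity_id = fila['BusinessEntityID']
--         business_entity_ids.append(business_entity_id)
--
--     business_entity_ids = list(set(business_entity_ids))
--     if len(business_entity_ids) == 1:
--         return True
--     return False
-- ===== SOURCE B (Python) =====
-- def _validar_si_los_pedidos_son_del_mismo_cliente(filas):
--     it = iter(filas)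
--     try:
--         first = next(it)['BusinessEntityID']
--     except StopIteration:
--         return False
--     return all(fila['BusinessEntityID'] == first for fila in it)
-- ===== Notes on version B (the rewrite author's own statement) =====
-- stated objective: idiomatic
-- what changed: Instead of collecting all IDs into a list, deduplicating via set() and testing its length, B takes the first row's ID as a reference and short-circuits with all() over the remaining rows; no collection is built.
import Mathlib
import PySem

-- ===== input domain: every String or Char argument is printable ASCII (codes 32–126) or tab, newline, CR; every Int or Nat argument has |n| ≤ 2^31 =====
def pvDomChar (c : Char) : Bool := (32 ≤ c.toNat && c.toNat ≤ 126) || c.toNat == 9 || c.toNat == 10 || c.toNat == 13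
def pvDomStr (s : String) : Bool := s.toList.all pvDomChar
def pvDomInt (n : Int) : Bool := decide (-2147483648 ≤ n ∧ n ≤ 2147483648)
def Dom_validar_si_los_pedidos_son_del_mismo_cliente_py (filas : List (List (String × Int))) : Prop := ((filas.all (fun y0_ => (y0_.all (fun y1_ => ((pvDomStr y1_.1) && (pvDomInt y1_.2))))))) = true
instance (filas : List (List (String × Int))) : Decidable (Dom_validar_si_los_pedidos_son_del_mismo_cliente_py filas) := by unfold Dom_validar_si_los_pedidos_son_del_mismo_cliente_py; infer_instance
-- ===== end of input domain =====

-- B replaces A's list-build + set-dedup + length test by a single short-circuiting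
-- scan comparing every row's ID against the first row's (idiomatic, no collection built).

-- ===== PORT A =====
-- fila['BusinessEntityID'] raises KeyError if absent: Pre_ excludes that; getD is the
-- total form, exact under Pre_.
def validar_si_los_pedidos_son_del_mismo_cliente_py (filas : List (List (String × Int))) : Bool :=
  let business_entity_ids :=
    filas.foldl (fun acc fila => acc ++ [(PySem.Dict.mk fila).getD "BusinessEntityID" 0]) []
  let business_entity_ids := PySem.Set.ofList business_entity_ids
  if business_entity_ids.length == 1 then true else false

-- ===== PORT B =====
def validar_si_los_pedidos_son_del_mismo_cliente_py_alt (filas : List (List (String × Int))) : Bool :=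
  match filas with
  | [] => false
  | f :: rest =>
    let first := (PySem.Dict.mk f).getD "BusinessEntityID" 0
    rest.all (fun fila => (PySem.Dict.mk fila).getD "BusinessEntityID" 0 == first)

-- ===== PRECONDITION & SPEC =====
-- Pre_: every row contains the key 'BusinessEntityID' (otherwise the Python A raises KeyError).
def Pre_validar_si_los_pedidos_son_del_mismo_cliente_py (filas : List (List (String × Int))) : Prop :=
  ∀ fila ∈ filas, ((PySem.Dict.mk fila).get? "BusinessEntityID").isSome
instance (filas : List (List (String × Int))) : Decidable (Pre_validar_si_los_pedidos_son_del_mismo_cliente_py filas) := by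
  unfold Pre_validar_si_los_pedidos_son_del_mismo_cliente_py; infer_instance
def pvWitness_validar_si_los_pedidos_son_del_mismo_cliente_py : (List (List (String × Int))) :=
  [[("BusinessEntityID", 3)], [("BusinessEntityID", 3), ("OrderID", 7)]]

def Spec_validar_si_los_pedidos_son_del_mismo_cliente_py (filas : List (List (String × Int))) (out : Bool) : Prop := out = validar_si_los_pedidos_son_del_mismo_cliente_py_alt filas
instance (filas : List (List (String × Int))) (out : Bool) : Decidable (Spec_validar_si_los_pedidos_son_del_mismo_cliente_py filas out) := by unfold Spec_validar_si_los_pedidos_son_del_mismo_cliente_py; infer_instance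

-- ===== CLAIM (what is proved, stated in full; the proofs are below) =====
def Claim_equal_validar_si_los_pedidos_son_del_mismo_cliente_py : Prop := ∀ (filas : List (List (String × Int))), Dom_validar_si_los_pedidos_son_del_mismo_cliente_py filas → Pre_validar_si_los_pedidos_son_del_mismo_cliente_py filas → Spec_validar_si_los_pedidos_son_del_mismo_cliente_py filas (validar_si_los_pedidos_son_del_mismo_cliente_py filas)

-- ===== LEMMAS AND PROOFS =====

-- A's accumulation loop builds exactly the map of the ID-extractor over the rows.
lemma foldl_append_map (g : List (String × Int) → Int) :
    ∀ (l : List (List (String × Int))) (init : List Int),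
      l.foldl (fun acc fila => acc ++ [g fila]) init = init ++ l.map g := by
  intro l
  induction l with
  | nil => intro init; simp
  | cons x xs ih => intro init; simp [List.foldl, ih]

lemma length_le_add (s : List Int) (x : Int) : s.length ≤ (PySem.Set.add s x).length := by
  rw [PySem.Set.add_eq_ite]
  split <;> simp

lemma length_le_foldl_add :
    ∀ (xs : List Int) (s : List Int), s.length ≤ (xs.foldl PySem.Set.add s).length := by
  intro xs
  induction xs with
  | nil => intro s; simp
  | cons x xs ih =>
    intro s
    exact le_trans (length_le_add s x) (ih (PySem.Set.add s x))

-- set([a]++xs) has one element iff every element of xs equals a.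
lemma foldl_add_singleton_length_eq_one :
    ∀ (xs : List Int) (a : Int),
      ((xs.foldl PySem.Set.add [a]).length == 1) = xs.all (fun x => x == a) := by
  intro xs
  induction xs with
  | nil => intro a; rfl
  | cons x xs ih =>
    intro a
    by_cases h : x = a
    · subst h
      simp [List.foldl, List.all, ih]
    · have hlen : 2 ≤ (xs.foldl PySem.Set.add [a, x]).length :=
        length_le_foldl_add xs [a, x]
      have hne : ((xs.foldl PySem.Set.add [a, x]).length == 1) = false := by
        rw [beq_eq_false_iff_ne]
        omega
      simp [List.foldl, List.all, hne, h]

-- ===== VERDICT (by name: the statement is the Claim_ definition above) =====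
theorem validar_si_los_pedidos_son_del_mismo_cliente_py_spec : Claim_equal_validar_si_los_pedidos_son_del_mismo_cliente_py := by
  intro filas _ _
  unfold Spec_validar_si_los_pedidos_son_del_mismo_cliente_py
  unfold validar_si_los_pedidos_son_del_mismo_cliente_py validar_si_los_pedidos_son_del_mismo_cliente_py_alt
  cases filas with
  | nil => rfl
  | cons f rest =>
    simp only [foldl_append_map (fun fila => (PySem.Dict.mk fila).getD "BusinessEntityID" 0)]
    have hof : PySem.Set.ofList
        (((f :: rest).map (fun fila => (PySem.Dict.mk fila).getD "BusinessEntityID" 0)))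
        = (rest.map (fun fila => (PySem.Dict.mk fila).getD "BusinessEntityID" 0)).foldl
            PySem.Set.add [(PySem.Dict.mk f).getD "BusinessEntityID" 0] := by
      simp [PySem.Set.ofList_eq_foldl, List.foldl, PySem.Set.add]
    simp only [List.nil_append, hof,
      foldl_add_singleton_length_eq_one
        (rest.map (fun fila => (PySem.Dict.mk fila).getD "BusinessEntityID" 0))
        ((PySem.Dict.mk f).getD "BusinessEntityID" 0),
      List.all_map]
    split <;> simp_all
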